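-- pv_equiv track=rewrite | github.com/Yikun/BBS | bbs/parse.py | _is_supported
-- ===== SOURCE A (Python) =====
-- def _is_supported(unsupported_platforms, node_hostname,
--                   node_Arch=None, node_pkgType=None):
--     if unsupported_platforms == None:
--         return True
--     for unsupported_platform in unsupported_platforms.split(','):
--         unsupported_platform = unsupported_platform.strip()
--         if unsupported_platform in ['', 'None', 'NA']:
--             continue
--         if unsupported_platform == node_hostname:
--             return False
--         if node_Arch != None and unsupported_platform == node_Arch:
--             return False
--         if node_pkgType == None or node_pkgType == 'source':
--             continue
--         ## If 'unsupported_platform' is mac.binary or mac.binary.*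
--         if unsupported_platform == node_pkgType:
--             return False
--         ## If 'unsupported_platform' is win or mac and 'node_pkgType' is
--         ## win.binary or mac.*:
--         if unsupported_platform in ['win', 'mac'] and \
--            node_pkgType.startswith(unsupported_platform):
--             return False
--     return True
-- ===== SOURCE B (Python) =====
-- def _is_supported(unsupported_platforms, node_hostname,
--                   node_Arch=None, node_pkgType=None):
--     if unsupported_platforms is None:
--         return True
--     # Stage 1: normalise the platform string into a set of effective tokens.
--     tokens = {t.strip() for t in unsupported_platforms.split(',')} - {'', 'None', 'NA'}
--     # Stage 2: the candidate strings whose presence makes the node unsupported.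
--     candidates = [node_hostname]
--     if node_Arch is not None:
--         candidates.append(node_Arch)
--     if node_pkgType is not None and node_pkgType != 'source':
--         candidates.append(node_pkgType)
--         if node_pkgType.startswith('win'):
--             candidates.append('win')
--         if node_pkgType.startswith('mac'):
--             candidates.append('mac')
--     # Stage 3: iterate over the candidates, not over the tokens.
--     return not any(c in tokens for c in candidates)
-- ===== Notes on version B (the rewrite author's own statement) =====
-- stated objective: alternative
-- what changed: Inverts the iteration: instead of scanning tokens and running a six-branch cascade on each, B normalises the token string into a set once and then loops over the at-most-five candidate forbidden strings (hostname, arch, pkgType and its win/mac prefixes), testing each for membership in the token set.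
import Mathlib
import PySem

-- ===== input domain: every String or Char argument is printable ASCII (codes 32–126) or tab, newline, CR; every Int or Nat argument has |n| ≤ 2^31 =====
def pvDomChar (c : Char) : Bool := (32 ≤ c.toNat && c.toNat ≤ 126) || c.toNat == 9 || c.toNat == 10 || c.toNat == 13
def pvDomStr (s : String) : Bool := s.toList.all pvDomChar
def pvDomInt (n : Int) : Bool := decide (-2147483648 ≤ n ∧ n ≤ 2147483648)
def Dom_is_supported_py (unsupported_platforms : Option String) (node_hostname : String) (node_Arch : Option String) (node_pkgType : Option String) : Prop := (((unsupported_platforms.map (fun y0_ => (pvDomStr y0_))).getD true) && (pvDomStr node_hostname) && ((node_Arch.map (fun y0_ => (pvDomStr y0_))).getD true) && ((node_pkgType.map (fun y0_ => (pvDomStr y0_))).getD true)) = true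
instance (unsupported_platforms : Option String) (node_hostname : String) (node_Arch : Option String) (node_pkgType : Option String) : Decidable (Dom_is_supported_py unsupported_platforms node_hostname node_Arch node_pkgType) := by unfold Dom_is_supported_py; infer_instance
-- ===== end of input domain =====

-- B inverts the iteration: it builds the set of effective tokens once and then loops over the few candidate forbidden strings, testing membership; objective: alternative.


-- ===== PORT A =====
-- A's for-loop over the comma-split tokens, with the same if-cascade in the same order.
def isSupportedLoopA (node_hostname : String) (node_Arch : Option String)
    (node_pkgType : Option String) : List String → Bool
  | [] => true
  | t :: rest =>
    let u := PySem.Str.strip t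
    if u = "" ∨ u = "None" ∨ u = "NA" then
      isSupportedLoopA node_hostname node_Arch node_pkgType rest
    else if u = node_hostname then false
    else if node_Arch ≠ none ∧ node_Arch = some u then false
    else if node_pkgType = none ∨ node_pkgType = some "source" then
      isSupportedLoopA node_hostname node_Arch node_pkgType rest
    else if some u = node_pkgType then false
    else if (u = "win" ∨ u = "mac") ∧
        PySem.Str.startswith (node_pkgType.getD "") u then false
    else isSupportedLoopA node_hostname node_Arch node_pkgType rest

def is_supported_py (unsupported_platforms : Option String) (node_hostname : String) (node_Arch : Option String) (node_pkgType : Option String) : Bool :=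
  match unsupported_platforms with
  | none => true
  | some s => isSupportedLoopA node_hostname node_Arch node_pkgType ((PySem.Str.split? s ",").getD [])

-- ===== PORT B =====
-- the candidate strings whose presence among the tokens makes the node unsupported
def candList (node_hostname : String) (node_Arch : Option String)
    (node_pkgType : Option String) : List String :=
  let c := [node_hostname]
  let c := match node_Arch with
    | some a => c ++ [a]
    | none => c
  match node_pkgType with
  | some p =>
    if p ≠ "source" then
      let c := c ++ [p]
      let c := if PySem.Str.startswith p "win" then c ++ ["win"] else c
      if PySem.Str.startswith p "mac" then c ++ ["mac"] else c
    else c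
  | none => c

def is_supported_py_alt (unsupported_platforms : Option String) (node_hostname : String) (node_Arch : Option String) (node_pkgType : Option String) : Bool :=
  match unsupported_platforms with
  | none => true
  | some s =>
    -- Stage 1: the set of effective tokens; Stage 2+3: loop over the candidates,
    -- testing membership in that set
    !((candList node_hostname node_Arch node_pkgType).any
        (fun c => PySem.Set.contains
          (PySem.Set.diff
            (PySem.Set.ofList (((PySem.Str.split? s ",").getD []).map PySem.Str.strip))
            ["", "None", "NA"]) c))

-- ===== PRECONDITION & SPEC =====
def Spec_is_supported_py (unsupported_platforms : Option String) (node_hostname : String) (node_Arch : Option String) (node_pkgType : Option String) (out : Bool) : Prop := out = is_supported_py_alt unsupported_platforms node_hostname node_Arch node_pkgType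
instance (unsupported_platforms : Option String) (node_hostname : String) (node_Arch : Option String) (node_pkgType : Option String) (out : Bool) : Decidable (Spec_is_supported_py unsupported_platforms node_hostname node_Arch node_pkgType out) := by unfold Spec_is_supported_py; infer_instance

-- ===== CLAIM =====
def Claim_equal_is_supported_py : Prop := ∀ (unsupported_platforms : Option String) (node_hostname : String) (node_Arch : Option String) (node_pkgType : Option String), Dom_is_supported_py unsupported_platforms node_hostname node_Arch node_pkgType → Spec_is_supported_py unsupported_platforms node_hostname node_Arch node_pkgType (is_supported_py unsupported_platforms node_hostname node_Arch node_pkgType)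

-- ===== LEMMAS AND PROOFS =====

-- membership in the candidate list, characterised
lemma mem_candList (h : String) (ar pk : Option String) (u : String) :
    u ∈ candList h ar pk ↔
      u = h ∨ ar = some u ∨
        (∃ p, pk = some p ∧ p ≠ "source" ∧
          (u = p ∨ (u = "win" ∧ PySem.Str.startswith p "win" = true) ∨
                   (u = "mac" ∧ PySem.Str.startswith p "mac" = true))) := by
  cases ar <;> cases pk <;>
    (simp only [candList]; try split_ifs) <;> simp_all <;> tauto

-- A's cascade for one token fires exactly on membership in the candidate list
lemma cascade (h : String) (ar pk : Option String) (u : String) (b : Bool) :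
    (if u = "" ∨ u = "None" ∨ u = "NA" then b
     else if u = h then false
     else if ar ≠ none ∧ ar = some u then false
     else if pk = none ∨ pk = some "source" then b
     else if some u = pk then false
     else if (u = "win" ∨ u = "mac") ∧ PySem.Str.startswith (pk.getD "") u then false
     else b)
    = if ¬(u = "" ∨ u = "None" ∨ u = "NA") ∧ u ∈ candList h ar pk then false else b := by
  cases ar <;> cases pk <;> (split_ifs <;> simp_all [mem_candList]) <;>
    (first | tauto | (by_cases hw : u = "win" <;> by_cases hm : u = "mac" <;> simp_all))

-- the loop of A, as an all-pass over the tokens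
lemma loopA_eq_all (h : String) (ar pk : Option String) (toks : List String) :
    isSupportedLoopA h ar pk toks =
      toks.all (fun t =>
        let u := PySem.Str.strip t
        !(decide (¬(u = "" ∨ u = "None" ∨ u = "NA") ∧ u ∈ candList h ar pk))) := by
  induction toks with
  | nil => rfl
  | cons t rest ih =>
    simp only [isSupportedLoopA]
    rw [cascade h ar pk (PySem.Str.strip t), List.all_cons, ← ih]
    by_cases hP : ¬(PySem.Str.strip t = "" ∨ PySem.Str.strip t = "None" ∨
        PySem.Str.strip t = "NA") ∧ PySem.Str.strip t ∈ candList h ar pk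
    · simp [hP]
    · simp [hP]

-- swapping the quantifiers: the token-pass equals the candidate-pass
lemma all_eq_not_any (h : String) (ar pk : Option String) (toks : List String) :
    toks.all (fun t =>
        let u := PySem.Str.strip t
        !(decide (¬(u = "" ∨ u = "None" ∨ u = "NA") ∧ u ∈ candList h ar pk))) =
      !((candList h ar pk).any (fun c =>
        PySem.Set.contains
          (PySem.Set.diff (PySem.Set.ofList (toks.map PySem.Str.strip)) ["", "None", "NA"]) c)) := by
  rw [Bool.eq_iff_iff]
  constructor
  · intro H
    simp only [List.all_eq_true] at H
    simp only [Bool.not_eq_true', List.any_eq_false]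
    intro c hc
    intro hcon
    rw [PySem.Set.contains_iff, PySem.Set.mem_diff, PySem.Set.mem_ofList, List.mem_map] at hcon
    obtain ⟨⟨t, ht, rfl⟩, hskip⟩ := hcon
    have hA := H t ht
    simp only [Bool.not_eq_eq_eq_not, Bool.not_true, decide_eq_false_iff_not, not_and] at hA
    simp only [List.mem_cons, List.not_mem_nil, or_false] at hskip
    rw [not_or, not_or] at hskip
    exact absurd hc (by tauto)
  · intro H
    simp only [Bool.not_eq_true', List.any_eq_false] at H
    simp only [List.all_eq_true]
    intro t ht
    simp only [Bool.not_eq_eq_eq_not, Bool.not_true, decide_eq_false_iff_not, not_and]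
    intro hskip hmem
    have hc := H _ hmem
    rw [PySem.Set.contains_iff, PySem.Set.mem_diff, PySem.Set.mem_ofList] at hc
    exact absurd ⟨List.mem_map.mpr ⟨t, ht, rfl⟩, by simpa using hskip⟩ hc

-- ===== VERDICT =====
theorem is_supported_py_spec : Claim_equal_is_supported_py := by
  intro up h ar pk _
  unfold Spec_is_supported_py
  cases up with
  | none => rfl
  | some s =>
    simp only [is_supported_py, is_supported_py_alt]
    rw [loopA_eq_all, all_eq_not_any]
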